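-- pv_equiv track=rewrite | github.com/Dakai666/Loom | loom/platform/cli/tui/components/input_area.py | _offset_to_location
-- ===== SOURCE A (Python) =====
-- def _offset_to_location(text: str, offset: int) -> tuple[int, int]:
--     """Convert a flat char offset into a (row, col) TextArea location."""
--     row = 0
--     col = 0
--     for ch in text[:offset]:
--         if ch == "\n":
--             row += 1
--             col = 0
--         else:
--             col += 1
--     return row, col
-- ===== SOURCE B (Python) =====
-- def _offset_to_location(text: str, offset: int) -> tuple[int, int]:
--     """Convert a flat char offset into a (row, col) TextArea location."""
--     lines = text[:offset].split("\n")
--     return len(lines) - 1, len(lines[-1])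
-- ===== Notes on version B (the rewrite author's own statement) =====
-- stated objective: faster
-- what changed: Instead of maintaining a (row,col) accumulator per character, B builds the list of lines of the sliced prefix with str.split('\n') and reads the location off the list's shape: row = number of pieces minus one, col = length of the last piece; split runs at C level, giving a constant-factor speedup.
import Mathlib
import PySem

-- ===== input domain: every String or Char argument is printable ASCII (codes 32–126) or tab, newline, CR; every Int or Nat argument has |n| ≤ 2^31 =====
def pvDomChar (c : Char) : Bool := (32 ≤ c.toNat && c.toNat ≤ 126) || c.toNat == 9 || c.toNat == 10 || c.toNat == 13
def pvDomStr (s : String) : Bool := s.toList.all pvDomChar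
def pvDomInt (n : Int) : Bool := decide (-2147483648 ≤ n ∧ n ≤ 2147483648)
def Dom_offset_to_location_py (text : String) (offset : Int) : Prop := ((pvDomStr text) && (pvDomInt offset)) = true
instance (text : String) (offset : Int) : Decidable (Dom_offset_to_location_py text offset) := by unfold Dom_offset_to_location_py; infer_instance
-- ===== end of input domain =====

-- B drops A's per-character (row,col) accumulator loop: it splits the sliced prefix
-- into its list of lines and reads the location off that list's shape.

-- ===== PORT A =====
-- for ch in text[:offset]: if ch == "\n": row += 1; col = 0 else: col += 1
def offset_to_location_py (text : String) (offset : Int) : Int × Int :=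
  (PySem.Str.slice text none (some offset)).toList.foldl
    (fun (rc : Int × Int) ch => if ch = '\n' then (rc.1 + 1, 0) else (rc.1, rc.2 + 1))
    (0, 0)

-- ===== PORT B =====
-- lines = text[:offset].split("\n"); return len(lines) - 1, len(lines[-1])
-- (split with a nonempty separator always returns a nonempty list, so lines[-1]
--  never raises; it is ported as pyGetD with an unused [] default)
def offset_to_location_py_alt (text : String) (offset : Int) : Int × Int :=
  let lines := PySem.Chars.splitOn (PySem.Str.slice text none (some offset)).toList ['\n']
  ((lines.length : Int) - 1, ((PySem.List.pyGetD lines (-1) ([] : List Char)).length : Int))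

-- ===== PRECONDITION & SPEC =====
def Spec_offset_to_location_py (text : String) (offset : Int) (out : Int × Int) : Prop := out = offset_to_location_py_alt text offset
instance (text : String) (offset : Int) (out : Int × Int) : Decidable (Spec_offset_to_location_py text offset out) := by unfold Spec_offset_to_location_py; infer_instance

-- ===== CLAIM (what is proved, stated in full; the proofs are below) =====
def Claim_equal_offset_to_location_py : Prop := ∀ (text : String) (offset : Int), Dom_offset_to_location_py text offset → Spec_offset_to_location_py text offset (offset_to_location_py text offset)

-- ===== LEMMAS AND PROOFS =====

-- proof-only reference model: splitting a char list at '\n'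
def splitNl : List Char → List (List Char)
  | [] => [[]]
  | c :: cs =>
      if c = '\n' then [] :: splitNl cs
      else match splitNl cs with
           | [] => [[c]]
           | p :: ps => (c :: p) :: ps

lemma splitNl_ne_nil : ∀ cs, splitNl cs ≠ [] := by
  intro cs
  cases cs with
  | nil => simp [splitNl]
  | cons c rest =>
      simp only [splitNl]
      split
      · simp
      · split <;> simp

-- PySem's fueled splitOn.go, specialised to the single-char separator '\n'
lemma go_eq_splitNl :
    ∀ (fuel : Nat) (l cur : List Char) (acc : List (List Char)), l.length ≤ fuel →
      PySem.Chars.splitOn.go ['\n'] fuel l cur acc =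
        acc.reverse ++ (match splitNl l with
                        | [] => []
                        | p :: ps => (cur.reverse ++ p) :: ps) := by
  intro fuel
  induction fuel with
  | zero =>
      intro l cur acc h
      have : l = [] := List.eq_nil_of_length_eq_zero (Nat.le_zero.mp h)
      subst this
      simp [PySem.Chars.splitOn.go, splitNl]
  | succ n ih =>
      intro l cur acc h
      cases l with
      | nil => simp [PySem.Chars.splitOn.go, splitNl]
      | cons c rest =>
          simp only [PySem.Chars.splitOn.go]
          by_cases hc : c = '\n'
          · subst hc
            have hp : (['\n'].isPrefixOf ('\n' :: rest)) = true := by simp [List.isPrefixOf]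
            rw [hp]
            simp only [if_true, List.length_cons, List.length_nil, List.drop_succ_cons,
              List.drop_zero]
            rw [ih rest [] (cur.reverse :: acc) (by simpa using h)]
            simp only [splitNl, if_true]
            cases hS : splitNl rest with
            | nil => exact absurd hS (splitNl_ne_nil rest)
            | cons p ps => simp
          · have hp : (['\n'].isPrefixOf (c :: rest)) = false := by
              simp [List.isPrefixOf]; exact fun e => hc e.symm
            rw [hp]
            simp only [Bool.false_eq_true, if_false]
            rw [ih rest (c :: cur) acc (by simpa using h)]
            simp only [splitNl, hc, if_false]
            cases hS : splitNl rest with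
            | nil => exact absurd hS (splitNl_ne_nil rest)
            | cons p ps => simp

lemma splitOn_eq_splitNl (cs : List Char) :
    PySem.Chars.splitOn cs ['\n'] = splitNl cs := by
  unfold PySem.Chars.splitOn
  rw [go_eq_splitNl (cs.length + 1) cs [] [] (by omega)]
  cases hS : splitNl cs with
  | nil => exact absurd hS (splitNl_ne_nil cs)
  | cons p ps => simp

-- how splitNl reacts to one character appended at the end
lemma splitNl_snoc (c : Char) :
    ∀ cs, splitNl (cs ++ [c]) =
      if c = '\n' then splitNl cs ++ [[]]
      else (splitNl cs).dropLast ++ [((splitNl cs).getLast?).getD [] ++ [c]] := by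
  intro cs
  induction cs with
  | nil =>
      by_cases hc : c = '\n' <;> simp [splitNl, hc]
  | cons a as ih =>
      by_cases ha : a = '\n'
      · subst ha
        simp only [List.cons_append, splitNl, if_true, ih]
        by_cases hc : c = '\n'
        · simp [hc]
        · simp only [hc, Bool.false_eq_true, if_false]
          cases hS : splitNl as with
          | nil => exact absurd hS (splitNl_ne_nil as)
          | cons p ps => simp
      · simp only [List.cons_append, splitNl, ha, if_false, ih]
        by_cases hc : c = '\n'
        · simp only [hc, if_true]
          cases hS : splitNl as with
          | nil => exact absurd hS (splitNl_ne_nil as)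
          | cons p ps => simp [splitNl, ha, hS]
        · simp only [hc, Bool.false_eq_true, if_false]
          cases hS : splitNl as with
          | nil => exact absurd hS (splitNl_ne_nil as)
          | cons p ps =>
              cases ps with
              | nil => simp [splitNl, ha, hS]
              | cons q qs =>
                  simp [splitNl, ha, hS, List.getLast?_cons_cons]

-- A's accumulator loop computes exactly the (pieces-1, last-piece-length) pair of splitNl
lemma fold_eq_splitNl (cs : List Char) :
    cs.foldl
        (fun (rc : Int × Int) ch => if ch = '\n' then (rc.1 + 1, 0) else (rc.1, rc.2 + 1))
        (0, 0) =
      (((splitNl cs).length : Int) - 1,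
        ((PySem.List.pyGetD (splitNl cs) (-1) ([] : List Char)).length : Int)) := by
  induction cs using List.reverseRecOn with
  | nil => decide
  | append_singleton cs c ih =>
      rw [List.foldl_append, ih, splitNl_snoc]
      have hne := splitNl_ne_nil cs
      by_cases hc : c = '\n'
      · subst hc
        simp only [if_true, List.foldl_cons, List.foldl_nil, if_true]
        rw [PySem.List.pyGetD_neg_one_append_singleton]
        simp
      · simp only [hc, Bool.false_eq_true, if_false, List.foldl_cons, List.foldl_nil]
        rw [PySem.List.pyGetD_neg_one_append_singleton]
        rw [PySem.List.pyGetD_neg_one _ _ hne]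
        have hpos : 0 < (splitNl cs).length := List.length_pos_of_ne_nil hne
        have hlast : ((splitNl cs).getLast?).getD [] = (splitNl cs).getLast hne := by
          rw [List.getLast?_eq_some_getLast hne]; rfl
        simp only [List.length_append, List.length_dropLast, List.length_cons,
          List.length_nil, hlast, Prod.mk.injEq]
        constructor
        · push_cast [Nat.sub_add_cancel hpos]; ring
        · push_cast; ring

-- ===== VERDICT (by name: the statement is the Claim_ definition above) =====
theorem offset_to_location_py_spec : Claim_equal_offset_to_location_py := by
  intro text offset _
  unfold Spec_offset_to_location_py offset_to_location_py offset_to_location_py_alt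
  rw [fold_eq_splitNl, splitOn_eq_splitNl]
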